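-- pv_equiv track=rewrite | github.com/CuriouserGeorge/python | punct.py | findShortestWords
-- ===== SOURCE A (Python) =====
-- def findShortestWords(txt):
--     import string
--     txt = txt.lower()
--     txt = txt.split()
--     txt.sort()
--
--     #print (txt)
--
--     minlength = min(len(s) for s in txt)
--
--     lst = []
--
--     for i in range(len(txt)):
--         if len(txt[i]) == minlength and txt[i].isalpha():
--             lst.append(txt[i])
--
--
--     return lst
-- ===== SOURCE B (Python) =====
-- def findShortestWords(txt):
--     best = None
--     shortest = []
--     for w in txt.lower().split():
--         if best is None or len(w) < best:
--             best = len(w)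
--             shortest = [w]
--         elif len(w) == best:
--             shortest.append(w)
--     return sorted(w for w in shortest if w.isalpha())
-- ===== Notes on version B (the rewrite author's own statement) =====
-- stated objective: alternative
-- what changed: B streams the words once, tracking the current minimum length and resetting/extending a candidate list on the fly (no sort of the full word list, no separate min pass), then sorts only the surviving alphabetic candidates; A sorts everything, computes min in a generator pass, and index-scans.
import Mathlib
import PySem

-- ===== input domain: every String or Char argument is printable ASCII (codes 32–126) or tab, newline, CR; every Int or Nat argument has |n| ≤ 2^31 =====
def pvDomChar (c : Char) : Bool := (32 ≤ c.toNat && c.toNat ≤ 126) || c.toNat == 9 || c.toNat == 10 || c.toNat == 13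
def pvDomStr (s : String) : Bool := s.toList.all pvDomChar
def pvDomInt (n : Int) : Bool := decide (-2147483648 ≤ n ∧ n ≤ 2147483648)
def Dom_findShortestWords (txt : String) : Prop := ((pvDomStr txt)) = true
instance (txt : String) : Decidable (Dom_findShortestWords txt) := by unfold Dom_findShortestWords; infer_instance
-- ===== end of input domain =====

-- B streams the words once, tracking the running minimum length with a reset-or-extend
-- candidate list, then sorts only the surviving alphabetic candidates (A sorts all words,
-- takes min in a second pass, and index-scans); objective: alternative.

-- ===== PORT A =====
def findShortestWords (txt : String) : List String :=
  let t := PySem.Str.lower txt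
  let ws := PySem.Str.split₀ t
  let ws := PySem.List.sorted ws (fun s => s)
  match PySem.List.min? (ws.map (fun s => PySem.Str.len s)) (fun x => x) with
  | none => []  -- Python's min() raises ValueError on an empty sequence; excluded by Pre_
  | some minlength =>
    (PySem.List.pyRange 0 (PySem.List.len ws)).foldl
      (fun lst i =>
        if (PySem.Str.len (PySem.List.pyGetD ws i "") == minlength
            && PySem.Str.strIsalpha (PySem.List.pyGetD ws i ""))
        then lst ++ [PySem.List.pyGetD ws i ""] else lst) []

-- ===== PORT B =====
-- the loop body of B: (best, shortest) updated by one word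
def fswStep (st : Option Int × List String) (w : String) : Option Int × List String :=
  match st.1 with
  | none => (some (PySem.Str.len w), [w])
  | some b =>
    if PySem.Str.len w < b then (some (PySem.Str.len w), [w])
    else if PySem.Str.len w == b then (some b, st.2 ++ [w])
    else st

def findShortestWords_alt (txt : String) : List String :=
  let ws := PySem.Str.split₀ (PySem.Str.lower txt)
  let st := ws.foldl fswStep ((none : Option Int), ([] : List String))
  PySem.List.sorted (st.2.filter (fun w => PySem.Str.strIsalpha w)) (fun s => s)

-- ===== PRECONDITION & SPEC =====
-- Pre_ excludes only whitespace-only/empty txt, on which A's min() raises ValueError (B returns []).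
def Pre_findShortestWords (txt : String) : Prop :=
  PySem.Str.split₀ (PySem.Str.lower txt) ≠ []
instance (txt : String) : Decidable (Pre_findShortestWords txt) := by
  unfold Pre_findShortestWords; infer_instance

def pvWitness_findShortestWords : String := "The cat sat"

def Spec_findShortestWords (txt : String) (out : List String) : Prop := out = findShortestWords_alt txt
instance (txt : String) (out : List String) : Decidable (Spec_findShortestWords txt out) := by unfold Spec_findShortestWords; infer_instance

-- ===== CLAIM (what is proved, stated in full; the proofs are below) =====
def Claim_equal_findShortestWords : Prop := ∀ (txt : String), Dom_findShortestWords txt → Pre_findShortestWords txt → Spec_findShortestWords txt (findShortestWords txt)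

-- ===== LEMMAS AND PROOFS =====

-- the first minimum (by the identity key) of a list of integers depends only on the multiset
theorem min?_id_perm_eq {xs ys : List Int} (h : xs.Perm ys) :
    PySem.List.min? xs (fun x => x) = PySem.List.min? ys (fun x => x) := by
  cases hx : PySem.List.min? xs (fun x => x) with
  | none =>
      rw [PySem.List.min?_eq_none_iff] at hx
      subst hx
      rw [(PySem.List.min?_eq_none_iff ys _).mpr (h.nil_eq).symm]
  | some m =>
      cases hy : PySem.List.min? ys (fun x => x) with
      | none =>
          rw [PySem.List.min?_eq_none_iff] at hy
          subst hy
          exact absurd (h.eq_nil ▸ PySem.List.min?_mem hx) (List.not_mem_nil)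
      | some m' =>
          have h1 : m ≤ m' := PySem.List.min?_isMin hx m' (h.mem_iff.mpr (PySem.List.min?_mem hy))
          have h2 : m' ≤ m := PySem.List.min?_isMin hy m (h.mem_iff.mp (PySem.List.min?_mem hx))
          exact congrArg some (le_antisymm h1 h2)

-- filtering a list sorted by the identity key equals sorting the filtered list
theorem filter_sorted_id (p : String → Bool) (ws : List String) :
    PySem.List.sorted (ws.filter p) (fun s => s)
      = (PySem.List.sorted ws (fun s => s)).filter p := by
  apply PySem.List.sorted_id_eq_of_perm_of_pairwise
  · exact (PySem.List.sorted_perm ws (fun s => s) false).filter p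
  · exact (PySem.List.sorted_pairwise ws (fun s => s)).filter p

-- the running minimum of B's loop, as a fold
def fswMin (ws : List String) (b : Int) : Int :=
  ws.foldl (fun a w => min a (PySem.Str.len w)) b

theorem fswMin_le (ws : List String) (b : Int) : fswMin ws b ≤ b := by
  induction ws generalizing b with
  | nil => exact le_of_eq rfl
  | cons w t ih =>
      have h : fswMin (w :: t) b = fswMin t (min b (PySem.Str.len w)) := rfl
      rw [h]
      exact le_trans (ih (min b (PySem.Str.len w))) (min_le_left _ _)

-- loop invariant of B's single pass, started from an already-seen best b and candidates acc
theorem fsw_inv (ws : List String) (b : Int) (acc : List String) :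
    ws.foldl fswStep (some b, acc)
      = (some (fswMin ws b),
         (if fswMin ws b = b then acc else [])
           ++ ws.filter (fun w => PySem.Str.len w == fswMin ws b)) := by
  induction ws generalizing b acc with
  | nil => simp [fswMin]
  | cons w t ih =>
      have hstep : fswStep (some b, acc) w
          = (if PySem.Str.len w < b then (some (PySem.Str.len w), [w])
             else if PySem.Str.len w == b then (some b, acc ++ [w])
             else (some b, acc)) := rfl
      have hmin : fswMin (w :: t) b = fswMin t (min b (PySem.Str.len w)) := rfl
      rcases lt_trichotomy (PySem.Str.len w) b with hlt | heq | hgt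
      · -- strictly shorter word: reset
        have hm : fswMin (w :: t) b = fswMin t (PySem.Str.len w) := by
          rw [hmin, min_eq_right (le_of_lt hlt)]
        have hle := fswMin_le t (PySem.Str.len w)
        have hne : fswMin t (PySem.Str.len w) ≠ b := by omega
        rw [List.foldl_cons, hstep, if_pos hlt, ih, hm, if_neg hne,
            List.nil_append, List.filter_cons]
        by_cases hw : PySem.Str.len w = fswMin t (PySem.Str.len w)
        · rw [if_pos hw.symm, if_pos (beq_iff_eq.mpr hw)]
          rfl
        · rw [if_neg (fun h => hw h.symm), if_neg (fun h => hw (beq_iff_eq.mp h))]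
          rfl
      · -- equal length: append
        have hm : fswMin (w :: t) b = fswMin t b := by
          rw [hmin, heq, min_self]
        rw [List.foldl_cons, hstep, if_neg (by omega), if_pos (beq_iff_eq.mpr heq), ih, hm,
            List.filter_cons]
        by_cases hmb : fswMin t b = b
        · rw [if_pos hmb, if_pos hmb, if_pos (beq_iff_eq.mpr (heq.trans hmb.symm)),
              List.append_assoc]
          rfl
        · have hwne : ¬ ((PySem.Str.len w == fswMin t b) = true) := by
            rw [beq_iff_eq]; omega
          rw [if_neg hmb, if_neg hmb, if_neg hwne]
      · -- longer word: skip
        have hm : fswMin (w :: t) b = fswMin t b := by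
          rw [hmin, min_eq_left (le_of_lt hgt)]
        have hle := fswMin_le t b
        have h2 : ¬ ((PySem.Str.len w == b) = true) := by rw [beq_iff_eq]; omega
        have hwne : ¬ ((PySem.Str.len w == fswMin t b) = true) := by
          rw [beq_iff_eq]; omega
        rw [List.foldl_cons, hstep, if_neg (by omega), if_neg h2, ih, hm,
            List.filter_cons, if_neg hwne]

-- B's pass over a nonempty word list yields the overall minimum and the words achieving it
theorem fsw_run (w : String) (t : List String) :
    (w :: t).foldl fswStep ((none : Option Int), ([] : List String))
      = (some (fswMin t (PySem.Str.len w)),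
         (w :: t).filter (fun x => PySem.Str.len x == fswMin t (PySem.Str.len w))) := by
  have hstep : fswStep ((none : Option Int), ([] : List String)) w
      = (some (PySem.Str.len w), [w]) := rfl
  rw [List.foldl_cons, hstep, fsw_inv, List.filter_cons]
  by_cases hw : PySem.Str.len w = fswMin t (PySem.Str.len w)
  · rw [if_pos hw.symm, if_pos (beq_iff_eq.mpr hw)]
    rfl
  · rw [if_neg (fun h => hw h.symm), if_neg (fun h => hw (beq_iff_eq.mp h))]
    rfl

-- fswMin is the fold that min?_id_cons produces on the mapped lengths
theorem fswMin_eq_foldl_map (t : List String) (b : Int) :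
    (t.map (fun s => PySem.Str.len s)).foldl min b = fswMin t b := by
  simp [fswMin, List.foldl_map]

theorem findShortestWords_spec_aux (txt : String)
    (hpre : PySem.Str.split₀ (PySem.Str.lower txt) ≠ []) :
    findShortestWords txt = findShortestWords_alt txt := by
  unfold findShortestWords findShortestWords_alt
  dsimp only
  cases hcase : PySem.Str.split₀ (PySem.Str.lower txt) with
  | nil => exact absurd hcase hpre
  | cons w t =>
    have hperm : (PySem.List.sorted (w :: t) (fun s => s)).Perm (w :: t) :=
      PySem.List.sorted_perm (w :: t) (fun s => s) false
    have hmin : PySem.List.min? ((PySem.List.sorted (w :: t) (fun s => s)).map (fun s => PySem.Str.len s)) (fun x => x)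
        = PySem.List.min? ((w :: t).map (fun s => PySem.Str.len s)) (fun x => x) :=
      min?_id_perm_eq (hperm.map _)
    have hmin2 : PySem.List.min? ((w :: t).map (fun s => PySem.Str.len s)) (fun x => x)
        = some (fswMin t (PySem.Str.len w)) := by
      rw [List.map_cons, PySem.List.min?_id_cons, fswMin_eq_foldl_map]
    rw [hmin, hmin2]
    dsimp only
    -- A's side: index loop over the sorted list = filter of the sorted list
    rw [PySem.List.foldl_append_if
          (fun i => PySem.Str.len (PySem.List.pyGetD (PySem.List.sorted (w :: t) (fun s => s)) i "") == fswMin t (PySem.Str.len w)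
              && PySem.Str.strIsalpha (PySem.List.pyGetD (PySem.List.sorted (w :: t) (fun s => s)) i ""))
          (fun i => PySem.List.pyGetD (PySem.List.sorted (w :: t) (fun s => s)) i "")]
    rw [List.nil_append]
    rw [show (fun i => PySem.Str.len (PySem.List.pyGetD (PySem.List.sorted (w :: t) (fun s => s)) i "") == fswMin t (PySem.Str.len w)
              && PySem.Str.strIsalpha (PySem.List.pyGetD (PySem.List.sorted (w :: t) (fun s => s)) i ""))
          = (fun x => PySem.Str.len x == fswMin t (PySem.Str.len w) && PySem.Str.strIsalpha x) ∘
            (fun i => PySem.List.pyGetD (PySem.List.sorted (w :: t) (fun s => s)) i "") from rfl]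
    rw [← List.filter_map, PySem.List.map_pyGetD_pyRange_zero]
    -- B's side: the streamed candidates are the length-M words, then filter ∘ filter = one filter
    rw [fsw_run]
    dsimp only
    rw [← filter_sorted_id]
    congr 1
    rw [List.filter_filter]
    exact List.filter_congr (fun x _ => Bool.and_comm _ _)

-- ===== VERDICT (by name: the statement is the Claim_ definition above) =====
theorem findShortestWords_spec : Claim_equal_findShortestWords := by
  intro txt _ hpre
  unfold Spec_findShortestWords
  exact findShortestWords_spec_aux txt hpre
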